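-- pv_equiv track=rewrite | github.com/ECB2020/Hobyah | generics.py | AlignListPrint
-- ===== SOURCE A (Python) =====
-- def AlignListPrint(arrays):
--     '''Take a list of lists of numbers. Each sub-list must be the same
--     length (we're using zip functions here).  For each index in the
--     sub-lists, figure out which takes up the most space when converted
--     to text.  Create a new list of lists.  Each sub-list contains the
--     original number as a string, formatted to be centred on the widest
--     width for that index.
--     '''
--     # Get the widths of the first list in the arrays.
--     widths = [len(str(entry)) for entry in arrays[0]]
--     # Loop over all the other lists in the arrays.
--     for my_list in arrays[1:]:
--         # Check if any of the values in this list are wider than the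
--         # current value.
--         for index, entry in enumerate(my_list):
--             candidate = len(str(entry))
--             if candidate > widths[index]:
--                 widths[index] = candidate
--     # Now get a list of strings in which all the numbers are centred
--     # on the maximum width for their index.  When these lists are
--     # printed by the routine that called here, the numbers will line up.
--     listoftexts = []
--     for my_list in arrays:
--         texts = [str(entry).center(width) for entry, width in zip(my_list, widths)]
--         listoftexts.append('[ ' + ', '.join(texts) + ']')
--     return(listoftexts)
-- ===== SOURCE B (Python) =====
-- def AlignListPrint(arrays):
--     '''Each column's width is derived from its extreme VALUES: since
--     len(str(n)) is monotone in n on the non-negatives and anti-monotone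
--     on the negatives, the widest rendering in a column is attained at
--     min(col) or max(col).  So phase 1 only finds the numeric min/max of
--     each column and stringifies those two numbers, instead of measuring
--     the string of every entry.'''
--     widths = []
--     for i in range(len(arrays[0])):
--         col = [row[i] for row in arrays if i < len(row)]
--         widths.append(max(len(str(min(col))), len(str(max(col)))))
--     return ['[ ' + ', '.join(str(e).center(w) for e, w in zip(row, widths)) + ']'
--             for row in arrays]
-- ===== Notes on version B (the rewrite author's own statement) =====
-- stated objective: alternative
-- what changed: Phase 1 no longer measures the string of every entry: B finds each column's numeric min and max and derives the column width as max(len(str(min)), len(str(max))), exploiting that len(str(n)) is monotone on non-negatives and anti-monotone on negatives (proved as pv_mono in Lean), so only two values per column are stringified.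
import Mathlib
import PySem

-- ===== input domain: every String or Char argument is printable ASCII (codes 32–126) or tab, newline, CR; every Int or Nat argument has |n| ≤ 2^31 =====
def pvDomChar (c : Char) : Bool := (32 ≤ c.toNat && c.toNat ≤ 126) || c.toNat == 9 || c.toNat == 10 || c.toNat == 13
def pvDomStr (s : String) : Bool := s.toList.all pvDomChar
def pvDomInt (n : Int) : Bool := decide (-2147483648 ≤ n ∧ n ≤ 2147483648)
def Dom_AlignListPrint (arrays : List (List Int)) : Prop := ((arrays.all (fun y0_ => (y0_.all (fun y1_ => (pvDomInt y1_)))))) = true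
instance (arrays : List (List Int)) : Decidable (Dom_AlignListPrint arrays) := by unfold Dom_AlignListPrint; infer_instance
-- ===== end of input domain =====

-- B replaces A's phase 1 (measure the string of every entry, keep a running
-- per-column max) by a value-based rule: len(str(.)) is monotone on the
-- non-negatives and anti-monotone on the negatives, so a column's width is
-- max(len(str(min(col))), len(str(max(col)))) — only the two numeric extremes
-- of each column are stringified.  Same asymptotic cost, different algorithm.

-- len(str(entry)) : width of an integer rendered as Python text
def pvLen (e : Int) : Nat := (PySem.Int.toChars e).length

-- str.center(width), exact port of CPython's padding rule for our nonnegative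
-- widths (marg = width - len; left = marg // 2 + (marg & width & 1)); both
-- Python versions call this same built-in.
def pvCenter (cs : List Char) (w : Nat) : List Char :=
  if w ≤ cs.length then cs
  else
    let marg := w - cs.length
    let left := marg / 2 + (marg &&& w &&& 1)
    List.replicate left ' ' ++ cs ++ List.replicate (marg - left) ' '

-- '[ ' + ', '.join(str(entry).center(width) for entry, width in zip(…)) + ']'
-- — phase 2 is identical in both Python versions, hence one shared helper.
def pvRow (row : List Int) (ws : List Nat) : String :=
  String.ofList ('[' :: ' ' ::
    (PySem.Chars.join [',', ' ']
      ((List.zip row ws).map (fun p => pvCenter (PySem.Int.toChars p.1) p.2)) ++ [']']))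

-- ===== PORT A =====
-- body of A's inner loop: candidate = len(str(entry)); if candidate > widths[index]: widths[index] = candidate
def pvStep (ws : List Nat) (p : Int × Int) : List Nat :=
  let candidate := pvLen p.2
  if candidate > PySem.List.pyGetD ws p.1 0 then PySem.List.pySetD ws p.1 candidate else ws

def AlignListPrint (arrays : List (List Int)) : List String :=
  -- widths = [len(str(entry)) for entry in arrays[0]]
  let widths0 := (arrays.getD 0 []).map pvLen
  -- for my_list in arrays[1:]: for index, entry in enumerate(my_list): pvStep
  let widths := (arrays.drop 1).foldl
    (fun ws my_list => (PySem.List.enumerate my_list).foldl pvStep ws) widths0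
  -- listoftexts = []; for my_list in arrays: … append('[ ' + ', '.join(texts) + ']')
  arrays.foldl (fun acc my_list => acc ++ [pvRow my_list widths]) []

-- ===== PORT B =====
def AlignListPrint_alt (arrays : List (List Int)) : List String :=
  -- for i in range(len(arrays[0])): col = [row[i] for row in arrays if i < len(row)]
  --   widths.append(max(len(str(min(col))), len(str(max(col)))))
  -- (min/max of a nonempty list; the .getD 0 is the total form of Python's min/max)
  let widths := (List.range (arrays.getD 0 []).length).map (fun i =>
    let col := arrays.filterMap (fun row => row[i]?)
    max (pvLen ((PySem.List.min? col (fun x => x)).getD 0))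
        (pvLen ((PySem.List.max? col (fun x => x)).getD 0)))
  arrays.map (fun row => pvRow row widths)

-- ===== PRECONDITION & SPEC =====
-- Pre_ excludes exactly the inputs where Python A raises IndexError:
-- empty `arrays` (arrays[0]) and rows longer than the first row (widths[index]).
def Pre_AlignListPrint (arrays : List (List Int)) : Prop :=
  arrays ≠ [] ∧ ∀ r ∈ arrays, r.length ≤ (arrays.getD 0 []).length
instance (arrays : List (List Int)) : Decidable (Pre_AlignListPrint arrays) := by
  unfold Pre_AlignListPrint; infer_instance

def pvWitness_AlignListPrint : List (List Int) := [[1, -23], [456, 7]]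

def Spec_AlignListPrint (arrays : List (List Int)) (out : List String) : Prop := out = AlignListPrint_alt arrays
instance (arrays : List (List Int)) (out : List String) : Decidable (Spec_AlignListPrint arrays out) := by unfold Spec_AlignListPrint; infer_instance

-- ===== CLAIM (what is proved, stated in full; the proofs are below) =====
def Claim_equal_AlignListPrint : Prop := ∀ (arrays : List (List Int)), Dom_AlignListPrint arrays → Pre_AlignListPrint arrays → Spec_AlignListPrint arrays (AlignListPrint arrays)

-- ===== LEMMAS AND PROOFS =====

-- length of Nat.toDigitsCore with enough fuel = decimal digit count
theorem pv_core_len : ∀ (f n : Nat) (acc : List Char), n < f →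
    (Nat.toDigitsCore 10 f n acc).length = Nat.log 10 n + 1 + acc.length := by
  intro f
  induction f with
  | zero => intro n acc h; omega
  | succ f ih =>
    intro n acc h
    simp only [Nat.toDigitsCore]
    by_cases h0 : n / 10 = 0
    · have hn : n < 10 := by omega
      rw [if_pos h0, Nat.log_of_lt hn]
      simp only [List.length_cons]
      omega
    · rw [if_neg h0]
      have h10 : 10 ≤ n := by
        by_contra hc
        exact h0 (Nat.div_eq_of_lt (by omega))
      have hlt : n / 10 < f := by
        have := Nat.div_lt_self (by omega : 0 < n) (by norm_num : 1 < 10)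
        omega
      rw [ih (n / 10) _ hlt]
      have hlog : Nat.log 10 (n / 10) = Nat.log 10 n - 1 := Nat.log_div_base 10 n
      have hpos : 0 < Nat.log 10 n := Nat.log_pos (by norm_num) h10
      simp only [List.length_cons]
      omega

-- decimal digit count of a Nat
theorem pv_toDigits_len (m : Nat) : (Nat.toDigits 10 m).length = Nat.log 10 m + 1 := by
  have := pv_core_len (m + 1) m [] (by omega)
  simpa [Nat.toDigits] using this

-- closed form of len(str(n)) on Int
theorem pv_pvLen (n : Int) :
    pvLen n = (if n < 0 then 1 else 0) + (Nat.log 10 n.natAbs + 1) := by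
  unfold pvLen PySem.Int.toChars
  by_cases h : n < 0
  · simp only [if_pos h, List.length_cons, pv_toDigits_len]
    omega
  · have : n.toNat = n.natAbs := by omega
    simp [h, pv_toDigits_len, this]

-- the width of any value between lo and hi is bounded by the widths at the ends
theorem pv_mono {lo n hi : Int} (h1 : lo ≤ n) (h2 : n ≤ hi) :
    pvLen n ≤ max (pvLen lo) (pvLen hi) := by
  rw [pv_pvLen, pv_pvLen, pv_pvLen]
  rcases le_or_gt 0 n with hn | hn
  · -- 0 ≤ n ≤ hi: bounded by hi's width
    refine le_trans ?_ (le_max_right _ _)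
    have habs : n.natAbs ≤ hi.natAbs := by omega
    have := Nat.log_mono_right (b := 10) habs
    have hhi : ¬ hi < 0 := by omega
    simp only [if_neg (by omega : ¬ n < 0), if_neg hhi]
    omega
  · -- lo ≤ n < 0: bounded by lo's width
    refine le_trans ?_ (le_max_left _ _)
    have habs : n.natAbs ≤ lo.natAbs := by omega
    have := Nat.log_mono_right (b := 10) habs
    have hlo : lo < 0 := by omega
    simp only [if_pos hn, if_pos hlo]
    omega

-- the running max of the widths of a nonempty column is the width at its extremes
theorem pv_colmax (col : List Int) (hne : col ≠ []) :
    (col.map pvLen).foldl max 0 =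
      max (pvLen ((PySem.List.min? col (fun x => x)).getD 0))
          (pvLen ((PySem.List.max? col (fun x => x)).getD 0)) := by
  obtain ⟨mn, hmn⟩ : ∃ mn, PySem.List.min? col (fun x => x) = some mn := by
    cases h : PySem.List.min? col (fun x => x) with
    | none =>
      rw [PySem.List.min?_eq_none_iff] at h
      exact absurd h hne
    | some mn => exact ⟨mn, rfl⟩
  obtain ⟨mx, hmx⟩ : ∃ mx, PySem.List.max? col (fun x => x) = some mx := by
    cases h : PySem.List.max? col (fun x => x) with
    | none =>
      rw [PySem.List.max?_eq_none_iff] at h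
      exact absurd h hne
    | some mx => exact ⟨mx, rfl⟩
  rw [hmn, hmx]
  simp only [Option.getD_some]
  apply Nat.le_antisymm
  · rcases PySem.List.foldl_max_mem (col.map pvLen) 0 with h | h
    · rw [h]; exact Nat.zero_le _
    · obtain ⟨x, hx, hfx⟩ := List.mem_map.mp h
      rw [← hfx]
      exact pv_mono (PySem.List.min?_isMin hmn x hx) (PySem.List.max?_isMax hmx x hx)
  · apply Nat.max_le.mpr
    constructor
    · exact (PySem.List.le_foldl_max (col.map pvLen) 0).2 _
        (List.mem_map_of_mem (PySem.List.min?_mem hmn))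
    · exact (PySem.List.le_foldl_max (col.map pvLen) 0).2 _
        (List.mem_map_of_mem (PySem.List.max?_mem hmx))

-- one pass of A's inner loop, characterised pointwise (via getD)
theorem pv_inner (r : List Int) (s : Nat) (ws : List Nat) :
    ((PySem.List.enumerate r (s : Int)).foldl pvStep ws).length = ws.length ∧
    ∀ j, j < ws.length →
      ((PySem.List.enumerate r (s : Int)).foldl pvStep ws).getD j 0 =
        if s ≤ j ∧ j < s + r.length then max (ws.getD j 0) (pvLen (r.getD (j - s) 0))
        else ws.getD j 0 := by
  induction r generalizing s ws with
  | nil =>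
    refine ⟨by simp [PySem.List.enumerate_nil], ?_⟩
    intro j hj
    rw [PySem.List.enumerate_nil, List.foldl_nil,
      if_neg (by simp only [List.length_nil]; omega)]
  | cons e r ih =>
    have hcast : (s : Int) + 1 = ((s + 1 : Nat) : Int) := by push_cast; ring
    rw [PySem.List.enumerate_cons, hcast]
    simp only [List.foldl_cons]
    have hstep : (pvStep ws ((s : Int), e)).length = ws.length ∧
        ∀ j, j < ws.length → (pvStep ws ((s : Int), e)).getD j 0 =
          if j = s then max (ws.getD s 0) (pvLen e) else ws.getD j 0 := by
      constructor
      · simp only [pvStep, PySem.List.pySetD_natCast]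
        split_ifs <;> simp
      · intro j hj
        simp only [pvStep, PySem.List.pyGetD_natCast, PySem.List.pySetD_natCast]
        split_ifs with h1 h2 h2
        · subst h2
          simp only [List.getD_eq_getElem?_getD, List.getElem?_set_of_lt _ _ hj]
          exact (Nat.max_eq_right (Nat.le_of_lt h1)).symm
        · simp only [List.getD_eq_getElem?_getD, List.getElem?_set_of_lt _ _ hj]
          rw [if_neg (Ne.symm h2)]
        · subst h2
          exact (Nat.max_eq_left (Nat.not_lt.mp h1)).symm
        · rfl
    obtain ⟨hl1, hv1⟩ := hstep
    obtain ⟨hl2, hv2⟩ := ih (s + 1) (pvStep ws ((s : Int), e))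
    refine ⟨by rw [hl2, hl1], ?_⟩
    intro j hj
    rw [hv2 j (by omega), hv1 j hj]
    by_cases hjs : j = s
    · have hc : s ≤ j ∧ j < s + (e :: r).length := by
        simp only [List.length_cons]; omega
      rw [if_neg (by omega : ¬ (s + 1 ≤ j ∧ j < s + 1 + r.length)), if_pos hjs, if_pos hc, hjs]
      simp
    · by_cases hin : s + 1 ≤ j ∧ j < s + 1 + r.length
      · have hc : s ≤ j ∧ j < s + (e :: r).length := by
          simp only [List.length_cons]; omega
        rw [if_pos hin, if_neg hjs, if_pos hc]
        have h3 : j - s = (j - (s + 1)) + 1 := by omega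
        rw [h3]
        simp
      · have hc : ¬ (s ≤ j ∧ j < s + (e :: r).length) := by
          simp only [List.length_cons]; omega
        rw [if_neg hin, if_neg hjs, if_neg hc]

-- A's whole phase-1 fold over the remaining rows, characterised pointwise
theorem pv_outer (rs : List (List Int)) (ws : List Nat) :
    (rs.foldl (fun ws r => (PySem.List.enumerate r).foldl pvStep ws) ws).length = ws.length ∧
    ∀ j, j < ws.length →
      (rs.foldl (fun ws r => (PySem.List.enumerate r).foldl pvStep ws) ws).getD j 0 =
        ((rs.filterMap (fun r => r[j]?)).map pvLen).foldl max (ws.getD j 0) := by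
  induction rs generalizing ws with
  | nil => simp
  | cons r rs ih =>
    have h0 : (PySem.List.enumerate r : List (Int × Int)) = PySem.List.enumerate r ((0 : Nat) : Int) := by norm_num
    obtain ⟨hl1, hv1⟩ := pv_inner r 0 ws
    rw [← h0] at hl1 hv1
    obtain ⟨hl2, hv2⟩ := ih ((PySem.List.enumerate r).foldl pvStep ws)
    simp only [List.foldl_cons]
    refine ⟨by rw [hl2, hl1], ?_⟩
    intro j hj
    rw [hv2 j (by omega), hv1 j hj]
    by_cases hr : j < r.length
    · rw [if_pos (by omega)]
      rw [List.filterMap_cons, List.getElem?_eq_getElem hr]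
      simp only [List.map_cons, List.foldl_cons]
      rw [Nat.sub_zero, List.getD_eq_getElem _ _ hr]
    · rw [if_neg (by omega)]
      rw [List.filterMap_cons, List.getElem?_eq_none (by omega)]

-- building a list by repeated append is map
theorem pv_foldl_append {α β : Type} (f : α → β) (l : List α) (acc : List β) :
    l.foldl (fun acc x => acc ++ [f x]) acc = acc ++ l.map f := by
  induction l generalizing acc with
  | nil => simp
  | cons x l ih => simp [ih]

-- A's width list equals B's width list (on a nonempty arrays list)
theorem pv_widths (a : List Int) (rest : List (List Int)) :
    (rest.foldl (fun ws r => (PySem.List.enumerate r).foldl pvStep ws) (a.map pvLen)) =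
    (List.range a.length).map (fun i =>
      let col := (a :: rest).filterMap (fun row => row[i]?)
      max (pvLen ((PySem.List.min? col (fun x => x)).getD 0))
          (pvLen ((PySem.List.max? col (fun x => x)).getD 0))) := by
  obtain ⟨hl, hv⟩ := pv_outer rest (a.map pvLen)
  apply List.ext_getElem
  · simpa using hl
  · intro i hi hi'
    have hia : i < a.length := by simpa using hi'
    have h1 : (rest.foldl (fun ws r => (PySem.List.enumerate r).foldl pvStep ws) (a.map pvLen))[i] =
        (rest.foldl (fun ws r => (PySem.List.enumerate r).foldl pvStep ws) (a.map pvLen)).getD i 0 := by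
      rw [List.getD_eq_getElem _ _ hi]
    rw [h1, hv i (by simpa using hia)]
    rw [List.getElem_map, List.getElem_range]
    have hcol : (a :: rest).filterMap (fun row => row[i]?) =
        a[i] :: rest.filterMap (fun row => row[i]?) := by
      rw [List.filterMap_cons, List.getElem?_eq_getElem hia]
    rw [← pv_colmax _ (by rw [hcol]; exact List.cons_ne_nil _ _), hcol]
    simp only [List.map_cons, List.foldl_cons, Nat.zero_max]
    congr 1
    rw [List.getD_eq_getElem _ _ (by simpa using hia), List.getElem_map]

-- ===== VERDICT (by name: the statement is the Claim_ definition above) =====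
theorem AlignListPrint_spec : Claim_equal_AlignListPrint := by
  intro arrays _hdom hpre
  obtain ⟨hne, -⟩ := hpre
  obtain ⟨a, rest, rfl⟩ : ∃ a rest, arrays = a :: rest := by
    cases arrays with
    | nil => exact absurd rfl hne
    | cons a rest => exact ⟨a, rest, rfl⟩
  unfold Spec_AlignListPrint AlignListPrint AlignListPrint_alt
  simp only [List.getD_cons_zero, List.drop_one, List.tail_cons]
  rw [pv_widths, pv_foldl_append]
  simp
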